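-- pv_equiv track=rewrite | github.com/garnettk/BaseCracker | basecracker.py | base85_encoder
-- ===== SOURCE A (Python) =====
-- def split_by_size(string, size):
--     splited = []
--     for k in range(0, len(string), size):
--         splited.append(string[0 + k:size + k])
--     return splited
--
-- base85_alphabet = '!"#$%&\'()*+,-./0123456789:;<=>?@ABCDEFGHIJKLMNOPQRSTUVWXYZ[\\]^_`abcdefghijklmnopqrstu'
--
-- def base85_encoder(plaintext):
--     cipher = ''
--
--     # padding
--     to_remove = 0
--     if len(plaintext) % 4 != 0:
--         to_remove = 4 - len(plaintext) % 4
--         plaintext += '\x00' * to_remove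
--     tokens = split_by_size(plaintext, 4)
--
--     for token in tokens:
--         value = ord(token[0]) * 256 ** 3 + ord(token[1]) * 256 ** 2 + ord(token[2]) * 256 + ord(token[3])
--         tmp_cipher = ''
--         for _ in range(5):
--             tmp_cipher += base85_alphabet[value % 85]
--             value //= 85
--         cipher += tmp_cipher[::-1]
--     if to_remove != 0:
--         cipher = cipher[0:-to_remove]
--     return cipher
-- ===== SOURCE B (Python) =====
-- base85_alphabet = '!"#$%&\'()*+,-./0123456789:;<=>?@ABCDEFGHIJKLMNOPQRSTUVWXYZ[\\]^_`abcdefghijklmnopqrstu'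
--
-- def base85_encoder(plaintext):
--     to_remove = (-len(plaintext)) % 4
--     if to_remove:
--         plaintext += '\x00' * to_remove
--     out = []
--     for i in range(0, len(plaintext), 4):
--         value = (ord(plaintext[i]) * 16777216 + ord(plaintext[i + 1]) * 65536
--                  + ord(plaintext[i + 2]) * 256 + ord(plaintext[i + 3]))
--         for p in (52200625, 614125, 7225, 85, 1):
--             idx, value = divmod(value, p)
--             out.append(base85_alphabet[idx])
--     cipher = ''.join(out)
--     return cipher[:len(cipher) - to_remove] if to_remove else cipher
-- ===== Notes on version B (the rewrite author's own statement) =====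
-- stated objective: alternative
-- what changed: Replaces A's split_by_size helper plus per-chunk LSB-first digit loop and string reversal by a direct 4-chars-at-a-time traversal that emits the five base-85 digits most-significant-first via divmod by the precomputed powers of 85, collecting them in a list joined once at the end.
import Mathlib
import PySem

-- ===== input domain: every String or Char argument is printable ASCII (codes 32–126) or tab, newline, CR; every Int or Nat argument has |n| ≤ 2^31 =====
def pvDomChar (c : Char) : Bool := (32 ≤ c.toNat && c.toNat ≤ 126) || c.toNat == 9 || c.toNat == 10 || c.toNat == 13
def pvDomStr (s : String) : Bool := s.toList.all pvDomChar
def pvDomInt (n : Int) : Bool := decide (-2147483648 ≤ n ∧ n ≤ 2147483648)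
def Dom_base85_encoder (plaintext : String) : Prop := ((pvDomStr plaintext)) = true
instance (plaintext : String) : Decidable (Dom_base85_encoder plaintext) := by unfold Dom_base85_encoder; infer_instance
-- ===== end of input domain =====

-- B replaces A's LSB-first digit loop + string reversal and the split_by_size helper by a
-- structural 4-chars-at-a-time recursion that emits the five base-85 digits most-significant-first
-- via div/mod by the precomputed powers of 85 (objective: alternative decomposition, same cost).

-- ===== PORT A =====
def pvB85 : List Char :=
  "!\"#$%&'()*+,-./0123456789:;<=>?@ABCDEFGHIJKLMNOPQRSTUVWXYZ[\\]^_`abcdefghijklmnopqrstu".toList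

def split_by_size (string : List Char) (size : Int) : List (List Char) :=
  (PySem.List.pyRange 0 string.length size).foldl
    (fun splited k => splited ++ [PySem.List.slice string (some (0 + k)) (some (size + k))]) []

def base85_encoder (plaintext : String) : String :=
  let pt := plaintext.toList
  let to_remove : Nat := if pt.length % 4 ≠ 0 then 4 - pt.length % 4 else 0
  let padded := pt ++ List.replicate to_remove '\x00'
  let tokens := split_by_size padded 4
  let cipher := tokens.foldl (fun cipher token =>
    let value : Nat :=
      (PySem.List.pyGetD token 0 '\x00').toNat * 256 ^ 3 +
      (PySem.List.pyGetD token 1 '\x00').toNat * 256 ^ 2 +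
      (PySem.List.pyGetD token 2 '\x00').toNat * 256 +
      (PySem.List.pyGetD token 3 '\x00').toNat
    let st := (PySem.List.pyRange 0 5 1).foldl
      (fun (st : List Char × Nat) _ =>
        (st.1 ++ [PySem.List.pyGetD pvB85 ((st.2 % 85 : Nat) : Int) '!'], st.2 / 85))
      ([], value)
    cipher ++ (PySem.List.slice? st.1 none none (-1)).getD []) []
  let cipher := if to_remove ≠ 0 then PySem.List.slice cipher (some 0) (some (-(to_remove : Int))) else cipher
  String.mk cipher

-- ===== PORT B =====
def pvChunk85 (v : Nat) : List Char :=
  (([52200625, 614125, 7225, 85, 1] : List Nat).foldl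
    (fun (st : List Char × Nat) p => (st.1 ++ [pvB85.getD (st.2 / p) '!'], st.2 % p))
    ([], v)).1

def pvEncode : List Char → List Char
  | a :: b :: c :: d :: rest =>
    pvChunk85 (a.toNat * 16777216 + b.toNat * 65536 + c.toNat * 256 + d.toNat) ++ pvEncode rest
  | _ => []

def base85_encoder_alt (plaintext : String) : String :=
  let l := plaintext.toList
  let r := (4 - l.length % 4) % 4
  let out := pvEncode (l ++ List.replicate r '\x00')
  String.mk (if r ≠ 0 then out.take (out.length - r) else out)

-- ===== PRECONDITION & SPEC =====
def Spec_base85_encoder (plaintext : String) (out : String) : Prop := out = base85_encoder_alt plaintext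
instance (plaintext : String) (out : String) : Decidable (Spec_base85_encoder plaintext out) := by unfold Spec_base85_encoder; infer_instance

-- ===== CLAIM (what is proved, stated in full; the proofs are below) =====
def Claim_equal_base85_encoder : Prop := ∀ (plaintext : String), Dom_base85_encoder plaintext → Spec_base85_encoder plaintext (base85_encoder plaintext)

-- ===== LEMMAS AND PROOFS =====

-- A's per-token loop body (named for the proofs; definitionally the body of A's fold)
def pvGA (token : List Char) : List Char :=
  (PySem.List.slice?
    (((PySem.List.pyRange 0 5 1).foldl
      (fun (st : List Char × Nat) _ =>
        (st.1 ++ [PySem.List.pyGetD pvB85 ((st.2 % 85 : Nat) : Int) '!'], st.2 / 85))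
      ([],
        (PySem.List.pyGetD token 0 '\x00').toNat * 256 ^ 3 +
        (PySem.List.pyGetD token 1 '\x00').toNat * 256 ^ 2 +
        (PySem.List.pyGetD token 2 '\x00').toNat * 256 +
        (PySem.List.pyGetD token 3 '\x00').toNat)).1)
    none none (-1)).getD []

theorem pv_chunk_eq (v : Nat) (hv : v < 4437053125) :
    ((PySem.List.pyRange 0 5 1).foldl
      (fun (st : List Char × Nat) _ =>
        (st.1 ++ [PySem.List.pyGetD pvB85 ((st.2 % 85 : Nat) : Int) '!'], st.2 / 85))
      ([], v)).1.reverse = pvChunk85 v := by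
  have hr : PySem.List.pyRange 0 5 1 = [0, 1, 2, 3, 4] := by decide
  rw [hr]
  simp only [List.foldl, pvChunk85, PySem.List.pyGetD_natCast, List.cons_append, List.nil_append,
    List.reverse_cons, List.reverse_nil, List.getD]
  have e1 : v / 85 / 85 / 85 / 85 % 85 = v / 52200625 := by omega
  have e2 : v / 85 / 85 / 85 % 85 = v % 52200625 / 614125 := by omega
  have e3 : v / 85 / 85 % 85 = v % 52200625 % 614125 / 7225 := by omega
  have e4 : v / 85 % 85 = v % 52200625 % 614125 % 7225 / 85 := by omega
  have e5 : v % 85 = v % 52200625 % 614125 % 7225 % 85 / 1 := by omega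
  rw [e1, e2, e3, e4, e5]

theorem pvGA_chunk (a b c d : Char) (ha : a.toNat ≤ 255) (hb : b.toNat ≤ 255)
    (hc : c.toNat ≤ 255) (hd : d.toNat ≤ 255) :
    pvGA [a, b, c, d] =
      pvChunk85 (a.toNat * 16777216 + b.toNat * 65536 + c.toNat * 256 + d.toNat) := by
  unfold pvGA
  rw [PySem.List.slice?_none_none_neg_one]
  simp only [Option.getD_some]
  have hg0 : PySem.List.pyGetD [a, b, c, d] 0 '\x00' = a := by
    simp [PySem.List.pyGetD]
  have hg1 : PySem.List.pyGetD [a, b, c, d] 1 '\x00' = b := by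
    simp [PySem.List.pyGetD]
  have hg2 : PySem.List.pyGetD [a, b, c, d] 2 '\x00' = c := by
    simp [PySem.List.pyGetD]
  have hg3 : PySem.List.pyGetD [a, b, c, d] 3 '\x00' = d := by
    simp [PySem.List.pyGetD]
  rw [hg0, hg1, hg2, hg3]
  have hv : a.toNat * 256 ^ 3 + b.toNat * 256 ^ 2 + c.toNat * 256 + d.toNat
      = a.toNat * 16777216 + b.toNat * 65536 + c.toNat * 256 + d.toNat := by norm_num
  rw [hv]
  exact pv_chunk_eq _ (by omega)

theorem pv_split_eq (k : Nat) (l : List Char) (hl : l.length = 4 * k) :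
    split_by_size l 4 = (List.range k).map (fun i => (l.drop (4 * i)).take 4) := by
  unfold split_by_size
  rw [PySem.List.pyRange_of_pos 0 (l.length) (by norm_num),
    PySem.List.foldl_append_singleton_eq_map, List.map_map, List.nil_append]
  have hn : (if (0:Int) < l.length then (((l.length : Int) - 0 + 4 - 1) / 4).toNat else 0) = k := by
    rw [hl]; split_ifs with h <;> omega
  rw [hn]
  refine List.map_congr_left (fun i hi => ?_)
  have h1 : (0:Int) + (0 + 4 * (i:Int)) = ((4 * i : Nat) : Int) := by push_cast; ring
  have h2 : (4:Int) + (0 + 4 * (i:Int)) = ((4 * i : Nat) : Int) + ((4:Nat) : Int) := by push_cast; ring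
  simp only [Function.comp_apply, h1, h2, PySem.List.slice_natCast_add]

theorem pv_flat_eq (k : Nat) (l : List Char) (hl : l.length = 4 * k)
    (hc : ∀ c ∈ l, c.toNat ≤ 255) :
    ((List.range k).map (fun i => (l.drop (4 * i)).take 4)).flatMap pvGA = pvEncode l := by
  induction k generalizing l with
  | zero =>
    have : l = [] := List.eq_nil_of_length_eq_zero (by omega)
    subst this; simp [pvEncode]
  | succ k ih =>
    match l, hl with
    | a :: b :: c :: d :: rest, hl =>
      have hrl : rest.length = 4 * k := by simp only [List.length_cons] at hl; omega
      rw [List.range_succ_eq_map]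
      simp only [List.map_cons, List.map_map, List.flatMap_cons]
      have hdrop : ∀ i : Nat,
          (((a :: b :: c :: d :: rest).drop (4 * (i + 1))).take 4)
            = ((rest.drop (4 * i)).take 4) := by
        intro i
        have h4 : 4 * (i + 1) = 4 + 4 * i := by ring
        rw [h4, ← List.drop_drop]
        rfl
      have hmap : ((List.range k).map (fun i =>
            (((a :: b :: c :: d :: rest).drop (4 * (i + 1))).take 4)))
          = (List.range k).map (fun i => (rest.drop (4 * i)).take 4) :=
        List.map_congr_left (fun i _ => hdrop i)
      have hcr : ∀ x ∈ rest, x.toNat ≤ 255 := fun x hx => hc x (by simp [hx])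
      calc pvGA (((a :: b :: c :: d :: rest).drop (4 * 0)).take 4) ++
            ((List.range k).map ((fun i => (((a :: b :: c :: d :: rest).drop (4 * i)).take 4)) ∘ Nat.succ)).flatMap pvGA
          = pvGA [a, b, c, d] ++
            ((List.range k).map (fun i => (rest.drop (4 * i)).take 4)).flatMap pvGA := by
            rw [← hmap]; rfl
        _ = pvEncode (a :: b :: c :: d :: rest) := by
            rw [pvGA_chunk a b c d (hc a (by simp)) (hc b (by simp)) (hc c (by simp)) (hc d (by simp)),
              ih rest hrl hcr]
            rfl

theorem pv_core (k : Nat) (l : List Char) (hl : l.length = 4 * k)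
    (hc : ∀ c ∈ l, c.toNat ≤ 255) :
    (split_by_size l 4).foldl (fun cipher token => cipher ++ pvGA token) [] = pvEncode l := by
  rw [PySem.List.foldl_append_eq_flatMap pvGA, List.nil_append, pv_split_eq k l hl,
    pv_flat_eq k l hl hc]

-- ===== VERDICT (by name: the statement is the Claim_ definition above) =====
theorem base85_encoder_spec : Claim_equal_base85_encoder := by
  intro plaintext hdom
  simp only [Spec_base85_encoder, base85_encoder, base85_encoder_alt]
  set l := plaintext.toList with hL
  have hdc : ∀ c ∈ l, c.toNat ≤ 255 := by
    intro c hcmem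
    have := List.all_eq_true.mp hdom c hcmem
    simp only [pvDomChar, Bool.or_eq_true, Bool.and_eq_true, decide_eq_true_eq, beq_iff_eq] at this
    omega
  have hrt : (if l.length % 4 ≠ 0 then 4 - l.length % 4 else 0) = (4 - l.length % 4) % 4 := by
    split_ifs with h <;> omega
  rw [hrt]
  set t : Nat := (4 - l.length % 4) % 4 with ht
  set padded := l ++ List.replicate t '\x00' with hp
  have hlen : padded.length = 4 * ((l.length + t) / 4) := by
    simp only [hp, List.length_append, List.length_replicate]
    omega
  have hcp : ∀ c ∈ padded, c.toNat ≤ 255 := by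
    intro c hcmem
    rcases List.mem_append.mp hcmem with h | h
    · exact hdc c h
    · rw [List.eq_of_mem_replicate h]; decide
  have hcore := pv_core _ padded hlen hcp
  rw [show (split_by_size padded 4).foldl (fun cipher token =>
        let value : Nat :=
          (PySem.List.pyGetD token 0 '\x00').toNat * 256 ^ 3 +
          (PySem.List.pyGetD token 1 '\x00').toNat * 256 ^ 2 +
          (PySem.List.pyGetD token 2 '\x00').toNat * 256 +
          (PySem.List.pyGetD token 3 '\x00').toNat
        let st := (PySem.List.pyRange 0 5 1).foldl
          (fun (st : List Char × Nat) _ =>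
            (st.1 ++ [PySem.List.pyGetD pvB85 ((st.2 % 85 : Nat) : Int) '!'], st.2 / 85))
          ([], value)
        cipher ++ (PySem.List.slice? st.1 none none (-1)).getD []) [] = pvEncode padded
    from hcore]
  by_cases h0 : t = 0
  · simp [h0]
  · simp only [h0, ite_not, if_false]
    rw [PySem.List.slice_zero_start, PySem.List.slice_to_neg_natCast _ t (by omega)]
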